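-- pv_equiv track=rewrite | github.com/Hrishikeshbele/Competitive-Programming_Python | largest xor with k bit set.py | kbits
-- ===== SOURCE A (Python) =====
-- import itertools
--
-- def kbits(n,k):
--     ans=[]
--     for comb in itertools.combinations(range(n),k):
--         s=['0']*n
--         for c in comb:
--             s[c]='1'
--         ans.append(''.join(s))
--
--     return ans
-- ===== SOURCE B (Python) =====
-- def kbits(n, k):
--     # Explicit-stack depth-first search: at each slot try '1' before '0'
--     # (which reproduces the lexicographic order of itertools.combinations).
--     # Each frame carries (slots_left, ones_still_needed, reversed prefix as a
--     # shared cons-chain), so no recursion and no per-frame string copying.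
--     m = n if n > 0 else 0
--     out = []
--     stack = [(m, k, None)]
--     while stack:
--         slots, ones, chain = stack.pop()
--         if ones < 0 or slots < ones:
--             continue
--         if slots == 0:
--             chars = []
--             while chain is not None:
--                 ch, chain = chain
--                 chars.append(ch)
--             out.append(''.join(reversed(chars)))
--             continue
--         stack.append((slots - 1, ones, ('0', chain)))
--         stack.append((slots - 1, ones - 1, ('1', chain)))
--     return out
-- ===== Notes on version B (the rewrite author's own statement) =====
-- stated objective: alternative
-- what changed: B replaces itertools.combinations index tuples plus '0'-array painting by an explicit-stack depth-first search that tries '1' before '0' at each slot and shares prefixes as cons-chains.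
import Mathlib
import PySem

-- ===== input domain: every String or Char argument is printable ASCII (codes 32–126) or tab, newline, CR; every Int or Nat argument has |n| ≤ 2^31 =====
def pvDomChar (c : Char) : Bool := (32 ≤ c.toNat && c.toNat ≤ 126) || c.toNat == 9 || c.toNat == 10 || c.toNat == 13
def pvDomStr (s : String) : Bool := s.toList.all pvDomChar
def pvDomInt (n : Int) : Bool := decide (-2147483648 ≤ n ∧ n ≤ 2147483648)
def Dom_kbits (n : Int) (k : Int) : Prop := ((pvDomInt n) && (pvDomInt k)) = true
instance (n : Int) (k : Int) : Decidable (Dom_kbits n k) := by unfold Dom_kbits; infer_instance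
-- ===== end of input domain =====

-- B replaces A's itertools.combinations + array-painting by a direct recursion on the
-- positions (a genuinely different decomposition, similar cost); A raises on k < 0 (Pre_).

-- ===== PORT A =====
-- itertools.combinations(xs, r), lexicographic order, ported by hand (exact for r ≥ 0;
-- Python raises ValueError for r < 0, which Pre_kbits excludes, hence k.toNat below)
-- (CPython's combinations returns no values at once when r > n — 'if r > n: return';
-- the same guard is kept here so the port, like its Python, is cheap in that case)
def pvCombs : List Int → Nat → List (List Int)
  | _, 0 => [[]]
  | [], _ + 1 => []
  | x :: rest, r + 1 =>
    if rest.length < r then []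
    else (pvCombs rest r).map (fun c => x :: c) ++ pvCombs rest (r + 1)

-- ['0']*n with negative n is [] in Python, matching List.replicate n.toNat;
-- s[c]='1' always has 0 ≤ c < n here (c comes from range(n)); ''.join(s) = String.ofList
def kbits (n : Int) (k : Int) : List String :=
  (pvCombs (PySem.List.pyRange 0 n 1) k.toNat).map (fun comb =>
    String.ofList (comb.foldl (fun s c => s.set c.toNat '1') (List.replicate n.toNat '0')))

-- ===== PORT B =====
-- Explicit-stack DFS; a frame is (slots_left, ones_needed, reversed prefix chain).
-- Python's stack pops from the end, so the Lean stack keeps the top at the head and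
-- Source B's append('0'-frame); append('1'-frame) becomes '1'-frame :: '0'-frame :: rest;
-- the chain cons-pairs are List Char, and the leaf's walk-then-reverse-join is
-- String.ofList chain.reverse (exact: the walk lists the chain, join reverses it).
def pvLoop : List (Int × Int × List Char) → List String → List String
  | [], out => out
  | (slots, ones, chain) :: rest, out =>
    if ones < 0 ∨ slots < ones then pvLoop rest out
    else if slots = 0 then pvLoop rest (out ++ [String.ofList chain.reverse])
    else pvLoop ((slots - 1, ones - 1, '1' :: chain) :: (slots - 1, ones, '0' :: chain) :: rest) out
termination_by stack _ => (stack.map (fun f => 3 ^ f.1.toNat)).sum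
decreasing_by
  · simp only [List.map_cons, List.sum_cons]
    have : 0 < 3 ^ slots.toNat := Nat.pow_pos (by norm_num)
    omega
  · simp only [List.map_cons, List.sum_cons]
    have : 0 < 3 ^ slots.toNat := Nat.pow_pos (by norm_num)
    omega
  · simp only [List.map_cons, List.sum_cons]
    have hs : 1 ≤ slots := by omega
    have h1 : slots.toNat = (slots - 1).toNat + 1 := by omega
    have h2 : 3 ^ ((slots - 1).toNat + 1) = 3 * 3 ^ ((slots - 1).toNat) := by ring
    have : 0 < 3 ^ (slots - 1).toNat := Nat.pow_pos (by norm_num)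
    rw [h1, h2]
    omega

def kbits_alt (n : Int) (k : Int) : List String :=
  pvLoop [((if n > 0 then n else 0), k, [])] []

-- ===== PRECONDITION & SPEC =====
-- Pre_ excludes only k < 0, on which Python A raises ValueError (itertools.combinations)
def Pre_kbits (n : Int) (k : Int) : Prop := 0 ≤ k
instance (n : Int) (k : Int) : Decidable (Pre_kbits n k) := by unfold Pre_kbits; infer_instance
def pvWitness_kbits : Int × Int := (4, 2)

def Spec_kbits (n : Int) (k : Int) (out : List String) : Prop := out = kbits_alt n k
instance (n : Int) (k : Int) (out : List String) : Decidable (Spec_kbits n k out) := by unfold Spec_kbits; infer_instance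

-- ===== CLAIM (what is proved, stated in full; the proofs are below) =====
def Claim_equal_kbits : Prop := ∀ (n : Int) (k : Int), Dom_kbits n k → Pre_kbits n k → Spec_kbits n k (kbits n k)

-- ===== LEMMAS AND PROOFS =====

-- proof-side bridge: the list of length-m strings with r ones that the DFS emits,
-- written as a recursion on m
-- f(m, r): strings of length m with exactly r ones, '1' branch before '0' branch
-- (structural recursion forces splitting on m; each arm keeps Source B's guard-then-build shape)
def pvAltF : Nat → Int → List String
  | 0, r => if r < 0 ∨ ((0 : Nat) : Int) < r then [] else [""]
  | m' + 1, r =>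
    if r < 0 ∨ ((m' + 1 : Nat) : Int) < r then []
    else ((pvAltF m' (r - 1)).map (fun s => "1" ++ s))
           ++ ((pvAltF m' r).map (fun s => "0" ++ s))


theorem pvCombs_cons_succ (x : Int) (xs : List Int) (r : Nat) :
    pvCombs (x :: xs) (r + 1)
      = if xs.length < r then []
        else (pvCombs xs r).map (fun c => x :: c) ++ pvCombs xs (r + 1) := rfl

theorem mem_pvCombs {xs : List Int} : ∀ {r c}, c ∈ pvCombs xs r → ∀ x ∈ c, x ∈ xs := by
  induction xs with
  | nil =>
    intro r c hc
    cases r with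
    | zero => simp [pvCombs] at hc; simp [hc]
    | succ r' => simp [pvCombs] at hc
  | cons a rest ih =>
    intro r c hc x hx
    cases r with
    | zero => simp [pvCombs] at hc; simp [hc] at hx
    | succ r' =>
      rw [pvCombs_cons_succ] at hc
      split at hc
      · simp at hc
      simp only [List.mem_append, List.mem_map] at hc
      rcases hc with ⟨c', hc', rfl⟩ | hc
      · rcases List.mem_cons.mp hx with rfl | hx
        · exact List.mem_cons_self
        · exact List.mem_cons_of_mem a (ih hc' x hx)
      · exact List.mem_cons_of_mem a (ih hc x hx)

theorem foldl_set_length (comb : List Int) (s : List Char) :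
    (comb.foldl (fun s c => s.set c.toNat '1') s).length = s.length := by
  induction comb generalizing s with
  | nil => rfl
  | cons c cs ih => simp [List.foldl_cons, ih]

theorem foldl_set_getElem (comb : List Int) (h0 : ∀ c ∈ comb, 0 ≤ c) :
    ∀ (s : List Char) (i : Nat) (hi : i < s.length),
      (comb.foldl (fun s c => s.set c.toNat '1') s)[i]'(by rw [foldl_set_length]; exact hi)
        = if (i : Int) ∈ comb then '1' else s[i]'hi := by
  induction comb with
  | nil => intro s i hi; simp
  | cons c cs ih =>
    intro s i hi
    have hc0 : 0 ≤ c := h0 c List.mem_cons_self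
    have h0' : ∀ x ∈ cs, 0 ≤ x := fun x hx => h0 x (List.mem_cons_of_mem c hx)
    simp only [List.foldl_cons]
    rw [ih h0' (s.set c.toNat '1') i (by simpa using hi)]
    by_cases hmem : (i : Int) ∈ cs
    · simp [hmem]
    · simp only [List.mem_cons, hmem, or_false]
      by_cases hic : (i : Int) = c
      · have ht : c.toNat = i := by omega
        simp [hic, ht]
      · have ht : c.toNat ≠ i := by omega
        rw [List.getElem_set_ne ht]
        simp [hic]

theorem build_eq (n : Nat) (comb : List Int) (h : ∀ c ∈ comb, 0 ≤ c) :
    comb.foldl (fun s c => s.set c.toNat '1') (List.replicate n '0')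
      = (List.range' 0 n).map (fun (i : Nat) => if (i : Int) ∈ comb then '1' else '0') := by
  apply List.ext_getElem
  · rw [foldl_set_length]; simp
  · intro i h1 h2
    have hi : i < n := by simpa using h2
    rw [foldl_set_getElem comb h (List.replicate n '0') i (by simpa using hi)]
    rw [List.getElem_map]
    have hr : (List.range' 0 n)[i]'(by simpa using hi) = i := by
      rw [List.getElem_range']; omega
    simp [hr]

theorem pvAltF_neg (m : Nat) (r : Int) (h : r < 0) : pvAltF m r = [] := by
  cases m <;> simp [pvAltF, h]

theorem pvAltF_big (m : Nat) (r : Int) (h : (m : Int) < r) : pvAltF m r = [] := by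
  cases m <;> simp [pvAltF] <;> intro h' <;> omega

theorem pvAltF_zero (m : Nat) :
    pvAltF (m + 1) (0 : Int) = (pvAltF m (0 : Int)).map (fun s => "0" ++ s) := by
  rw [pvAltF]
  rw [show (0 : Int) - 1 = -1 from rfl, pvAltF_neg m (-1) (by norm_num)]
  simp
  intro h'
  omega

theorem pvAltF_succ (m r : Nat) :
    pvAltF (m + 1) ((r : Int) + 1)
      = ((pvAltF m r).map (fun s => "1" ++ s)) ++ ((pvAltF m ((r : Int) + 1)).map (fun s => "0" ++ s)) := by
  rw [pvAltF]
  by_cases h : (m : Int) < (r : Int)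
  · rw [if_pos (by push_cast; omega)]
    rw [pvAltF_big m r h, pvAltF_big m ((r : Int) + 1) (by omega)]
    rfl
  · rw [if_neg (by push_cast; omega)]
    norm_num

theorem str_cons_one (l : List Char) : "1" ++ String.ofList l = String.ofList ('1' :: l) := by
  rw [show ("1" : String) = String.ofList ['1'] from rfl, ← String.ofList_append]; simp

theorem str_cons_zero (l : List Char) : "0" ++ String.ofList l = String.ofList ('0' :: l) := by
  rw [show ("0" : String) = String.ofList ['0'] from rfl, ← String.ofList_append]; simp


-- what a stack frame contributes to the output
def pvFrameStrs (f : Int × Int × List Char) : List String :=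
  (pvAltF f.1.toNat f.2.1).map (fun s => String.ofList f.2.2.reverse ++ s)

theorem pvAltF_expand (s r : Int) (hs : 1 ≤ s) (hr : 0 ≤ r) :
    pvAltF s.toNat r
      = ((pvAltF (s - 1).toNat (r - 1)).map (fun t => "1" ++ t))
          ++ ((pvAltF (s - 1).toNat r).map (fun t => "0" ++ t)) := by
  have hm : s.toNat = (s - 1).toNat + 1 := by omega
  rw [hm]
  by_cases hr0 : r = 0
  · subst hr0
    rw [pvAltF_zero, show (0 : Int) - 1 = -1 from rfl, pvAltF_neg _ (-1) (by norm_num)]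
    rfl
  · have hr1 : r = ((r - 1).toNat : Int) + 1 := by omega
    rw [hr1, pvAltF_succ]
    have h2 : ((r - 1).toNat : Int) = r - 1 := by omega
    rw [h2]
    norm_num

theorem pvLoop_spec : ∀ (stack : List (Int × Int × List Char)) (out : List String),
    (∀ f ∈ stack, 0 ≤ f.1) → pvLoop stack out = out ++ stack.flatMap pvFrameStrs := by
  apply pvLoop.induct
    (motive := fun stack out =>
      (∀ f ∈ stack, 0 ≤ f.1) → pvLoop stack out = out ++ stack.flatMap pvFrameStrs)
  case case1 =>
    intro out _
    simp [pvLoop]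
  case case2 =>
    intro slots ones chain rest out hpr ih h
    rw [pvLoop, if_pos hpr, ih (fun f hf => h f (List.mem_cons_of_mem _ hf))]
    have h0 : 0 ≤ slots := by have := h _ List.mem_cons_self; simpa using this
    have hz : pvFrameStrs (slots, ones, chain) = [] := by
      unfold pvFrameStrs
      rcases hpr with hneg | hbig
      · rw [pvAltF_neg _ _ hneg]; rfl
      · rw [pvAltF_big _ _ (by simp; omega)]; rfl
    simp [hz]
  case case3 =>
    intro ones chain rest out hpr ih h
    have ih2 : pvLoop rest (out ++ [String.ofList chain.reverse])
        = out ++ [String.ofList chain.reverse] ++ List.flatMap pvFrameStrs rest := by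
      have := ih (fun f hf => h f (List.mem_cons_of_mem _ hf))
      simpa using this
    rw [pvLoop, if_neg hpr, if_pos rfl, ih2]
    have hones : ones = 0 := by omega
    have hfr : pvFrameStrs (0, ones, chain) = [String.ofList chain.reverse] := by
      unfold pvFrameStrs
      rw [hones]
      simp [pvAltF]
    simp [hfr]
  case case4 =>
    intro slots ones chain rest out hpr hz ih h
    have h0 : 0 ≤ slots := by have := h _ List.mem_cons_self; simpa using this
    have h1 : 1 ≤ slots := by omega
    have hr : 0 ≤ ones := by omega
    rw [pvLoop, if_neg hpr, if_neg hz, ih ?hnn]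
    case hnn =>
      intro f hf
      rcases List.mem_cons.mp hf with rfl | hf'
      · simp; omega
      rcases List.mem_cons.mp hf' with rfl | hf''
      · simp; omega
      · exact h f (List.mem_cons_of_mem _ hf'')
    have key : pvFrameStrs (slots - 1, ones - 1, '1' :: chain)
          ++ pvFrameStrs (slots - 1, ones, '0' :: chain)
        = pvFrameStrs (slots, ones, chain) := by
      unfold pvFrameStrs
      simp only [List.reverse_cons, String.ofList_append]
      rw [pvAltF_expand slots ones h1 hr, List.map_append, List.map_map, List.map_map]
      congr 1
      · apply List.map_congr_left
        intro t _
        simp only [Function.comp_apply]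
        rw [show String.ofList ['1'] = "1" from rfl, String.append_assoc]
      · apply List.map_congr_left
        intro t _
        simp only [Function.comp_apply]
        rw [show String.ofList ['0'] = "0" from rfl, String.append_assoc]
    simp only [List.flatMap_cons, ← List.append_assoc, key]

theorem combs_range (m : Nat) : ∀ (a : Nat) (r : Nat),
    (pvCombs ((List.range' a m).map (fun (i : Nat) => (i : Int))) r).map
      (fun comb => String.ofList ((List.range' a m).map (fun (i : Nat) => if (i : Int) ∈ comb then '1' else '0')))
      = pvAltF m (r : Int) := by
  induction m with
  | zero =>
    intro a r
    cases r with
    | zero => simp [pvAltF, pvCombs]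
    | succ r' => simp [pvAltF, pvCombs]
  | succ m' ih =>
    intro a r
    have hrange : List.range' a (m' + 1) = a :: List.range' (a + 1) m' := List.range'_succ
    cases r with
    | zero =>
      rw [hrange]
      simp only [Nat.cast_zero]
      rw [pvAltF_zero]
      have h0 := ih (a + 1) 0
      simp only [Nat.cast_zero] at h0
      rw [← h0]
      simp [pvCombs, ← str_cons_zero]
    | succ r' =>
      by_cases hbig : m' < r'
      · rw [hrange, List.map_cons, pvCombs_cons_succ,
            if_pos (by simpa using hbig)]
        rw [pvAltF_big (m' + 1) ((r' + 1 : Nat) : Int) (by push_cast; omega)]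
        rfl
      rw [hrange, List.map_cons, pvCombs_cons_succ,
          if_neg (by simpa using hbig), List.map_append, List.map_map]
      have hfirst :
          (pvCombs ((List.range' (a + 1) m').map (fun (i : Nat) => (i : Int))) r').map
            ((fun comb => String.ofList (((a : Nat) :: List.range' (a + 1) m').map
                (fun (i : Nat) => if (i : Int) ∈ comb then '1' else '0'))) ∘ (fun c => (a : Int) :: c))
          = ((pvCombs ((List.range' (a + 1) m').map (fun (i : Nat) => (i : Int))) r').map
              (fun comb => String.ofList ((List.range' (a + 1) m').map
                (fun (i : Nat) => if (i : Int) ∈ comb then '1' else '0')))).map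
              (fun s => "1" ++ s) := by
        rw [List.map_map]
        apply List.map_congr_left
        intro c _
        simp only [Function.comp_apply, List.map_cons]
        rw [if_pos List.mem_cons_self, ← str_cons_one]
        congr 2
        apply List.map_congr_left
        intro i hi
        have hia : a + 1 ≤ i := (List.mem_range'_1.mp hi).1
        have hne : ((i : Nat) : Int) ≠ ((a : Nat) : Int) := by
          intro hE
          have : i = a := by exact_mod_cast hE
          omega
        have hne2 : i ≠ a := by omega
        simp [List.mem_cons, hne]
      have hsecond :
          (pvCombs ((List.range' (a + 1) m').map (fun (i : Nat) => (i : Int))) (r' + 1)).map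
            (fun comb => String.ofList (((a : Nat) :: List.range' (a + 1) m').map
                (fun (i : Nat) => if (i : Int) ∈ comb then '1' else '0')))
          = ((pvCombs ((List.range' (a + 1) m').map (fun (i : Nat) => (i : Int))) (r' + 1)).map
              (fun comb => String.ofList ((List.range' (a + 1) m').map
                (fun (i : Nat) => if (i : Int) ∈ comb then '1' else '0')))).map
              (fun s => "0" ++ s) := by
        rw [List.map_map]
        apply List.map_congr_left
        intro c hc
        simp only [Function.comp_apply, List.map_cons]
        have hnotmem : ((a : Nat) : Int) ∉ c := by
          intro hmem
          have := mem_pvCombs hc _ hmem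
          simp only [List.mem_map] at this
          obtain ⟨i, hi, hE⟩ := this
          have hia : a + 1 ≤ i := (List.mem_range'_1.mp hi).1
          omega
        rw [if_neg hnotmem, str_cons_zero]
      rw [hfirst, hsecond, ih (a + 1) r', ih (a + 1) (r' + 1)]
      have hc : ((r' + 1 : Nat) : Int) = (r' : Int) + 1 := by push_cast; ring
      rw [hc]
      rw [pvAltF_succ m' r']

-- ===== VERDICT (by name: the statement is the Claim_ definition above) =====
theorem kbits_spec : Claim_equal_kbits := by
  intro n k _ hk
  unfold Spec_kbits kbits kbits_alt
  have hpr : PySem.List.pyRange 0 n 1 = (List.range' 0 n.toNat).map (fun (i : Nat) => (i : Int)) := by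
    rw [PySem.List.pyRange_one]
    simp [List.range_eq_range']
  rw [hpr]
  have hmem : ∀ comb ∈ pvCombs ((List.range' 0 n.toNat).map (fun (i : Nat) => (i : Int))) k.toNat,
      ∀ c ∈ comb, 0 ≤ c := by
    intro comb hcomb c hc
    have := mem_pvCombs hcomb c hc
    simp only [List.mem_map] at this
    obtain ⟨i, _, hE⟩ := this
    omega
  rw [List.map_congr_left (fun comb hcomb => by
    rw [build_eq n.toNat comb (hmem comb hcomb)])]
  rw [combs_range n.toNat 0 k.toNat]
  unfold Pre_kbits at hk
  rw [pvLoop_spec _ _ (by intro f hf; simp at hf; subst hf; dsimp; split <;> omega)]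
  have hm : (if n > 0 then n else 0).toNat = n.toNat := by split <;> omega
  simp only [List.flatMap_cons, List.flatMap_nil, List.nil_append, List.append_nil]
  unfold pvFrameStrs
  simp only [hm]
  have hcast : ((k.toNat : Int)) = k := by omega
  rw [hcast]
  simp
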